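-- pv_equiv track=rewrite | github.com/sean-lo/staircase_boolean | staircase_resnet_tests.py | get_staircase_fourier_coeff_tuples
-- ===== SOURCE A (Python) =====
-- def get_staircase_fourier_coeff_tuples(n,d):
--     track_fourier_coeffs_tuples = []
--     for j in range(d+1):
--         curr_coeff = []
--         for i in range(n):
--             if i < j:
--                 curr_coeff.append(-1)
--             else:
--                 curr_coeff.append(1)
--         curr_coeff = tuple(curr_coeff)
--         track_fourier_coeffs_tuples.append(curr_coeff)
--     return track_fourier_coeffs_tuples
-- ===== SOURCE B (Python) =====
-- def get_staircase_fourier_coeff_tuples(n, d):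
--     if d < 0:
--         return []
--     curr = [1] * n
--     result = [tuple(curr)]
--     for j in range(1, d + 1):
--         if j - 1 < n:
--             curr[j - 1] = -1
--         result.append(tuple(curr))
--     return result
-- ===== Notes on version B (the rewrite author's own statement) =====
-- stated objective: alternative
-- what changed: Instead of rebuilding each tuple element-by-element with an i<j branch (nested loops), B keeps one running list and flips a single position to -1 per step, snapshotting it into the result.
import Mathlib
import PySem

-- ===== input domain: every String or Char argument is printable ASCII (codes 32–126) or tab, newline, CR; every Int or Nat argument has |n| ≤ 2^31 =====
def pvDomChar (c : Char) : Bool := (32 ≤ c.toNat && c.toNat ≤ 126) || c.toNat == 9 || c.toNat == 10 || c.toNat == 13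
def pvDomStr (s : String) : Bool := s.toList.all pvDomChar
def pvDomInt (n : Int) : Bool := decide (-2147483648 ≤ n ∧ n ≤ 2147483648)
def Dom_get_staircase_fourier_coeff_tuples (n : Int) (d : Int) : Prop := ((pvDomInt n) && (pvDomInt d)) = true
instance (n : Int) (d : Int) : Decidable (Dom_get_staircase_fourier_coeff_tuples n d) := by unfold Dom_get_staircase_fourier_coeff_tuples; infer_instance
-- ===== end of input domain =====

-- B replaces the nested element-by-element rebuild by one running list with a single -1 flip per step, snapshotted into the result.

-- ===== PORT A =====
def get_staircase_fourier_coeff_tuples (n : Int) (d : Int) : List (List Int) :=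
  (PySem.List.pyRange 0 (d+1) 1).foldl
    (fun acc j =>
      acc ++ [(PySem.List.pyRange 0 n 1).foldl
        (fun c i => c ++ [if i < j then -1 else 1]) []])
    []

-- ===== PORT B =====
def get_staircase_fourier_coeff_tuples_alt (n : Int) (d : Int) : List (List Int) :=
  if d < 0 then []
  else
    let curr0 : List Int := List.replicate n.toNat 1
    ((PySem.List.pyRange 1 (d+1) 1).foldl
      (fun (st : List Int × List (List Int)) j =>
        let curr := if j - 1 < n then st.1.set (j-1).toNat (-1) else st.1
        (curr, st.2 ++ [curr]))
      (curr0, [curr0])).2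

-- ===== PRECONDITION & SPEC =====
def Spec_get_staircase_fourier_coeff_tuples (n : Int) (d : Int) (out : List (List Int)) : Prop := out = get_staircase_fourier_coeff_tuples_alt n d
instance (n : Int) (d : Int) (out : List (List Int)) : Decidable (Spec_get_staircase_fourier_coeff_tuples n d out) := by unfold Spec_get_staircase_fourier_coeff_tuples; infer_instance

-- ===== CLAIM (what is proved, stated in full; the proofs are below) =====
def Claim_equal_get_staircase_fourier_coeff_tuples : Prop := ∀ (n : Int) (d : Int), Dom_get_staircase_fourier_coeff_tuples n d → Spec_get_staircase_fourier_coeff_tuples n d (get_staircase_fourier_coeff_tuples n d)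

-- ===== LEMMAS AND PROOFS =====

/-- The `j`-th coefficient tuple: `-1` below `j`, `1` from `j` on. -/
def pvTup (n : Int) (j : Int) : List Int :=
  (List.range n.toNat).map (fun (i : Nat) => if (i : Int) < j then -1 else 1)

theorem pv_foldl_app {α β : Type} (f : α → β) :
    ∀ (xs : List α) (acc : List β),
      xs.foldl (fun c i => c ++ [f i]) acc = acc ++ xs.map f := by
  intro xs
  induction xs with
  | nil => simp
  | cons x xs ih => intro acc; rw [List.foldl_cons, ih]; simp

theorem pv_inner (n j : Int) :
    (PySem.List.pyRange 0 n 1).foldl (fun c i => c ++ [if i < j then -1 else 1]) []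
      = pvTup n j := by
  rw [pv_foldl_app (fun i => if i < j then -1 else 1), PySem.List.pyRange_one]
  rw [List.nil_append, List.map_map, show n - (0:Int) = n from by ring]
  simp only [pvTup]
  apply List.map_congr_left
  intro i _
  simp [Function.comp]

theorem pv_tup_zero (n : Int) : pvTup n 0 = List.replicate n.toNat 1 := by
  apply List.ext_getElem
  · simp [pvTup]
  · intro k h1 h2
    simp only [pvTup, List.getElem_map, List.getElem_range, List.getElem_replicate]
    rw [if_neg (by omega)]

theorem pv_flip (n : Int) (s : Int) (hs : 0 ≤ s) :
    (if s < n then (pvTup n s).set s.toNat (-1) else pvTup n s) = pvTup n (s + 1) := by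
  by_cases h : s < n
  · rw [if_pos h]
    apply List.ext_getElem
    · simp [pvTup]
    · intro k hk hk2
      have hkn : k < n.toNat := by
        simpa [pvTup] using hk2
      rw [List.getElem_set]
      by_cases hks : s.toNat = k
      · rw [if_pos hks]
        simp only [pvTup, List.getElem_map, List.getElem_range]
        rw [if_pos (by omega)]
      · rw [if_neg hks]
        simp only [pvTup, List.getElem_map, List.getElem_range]
        by_cases h3 : (k : Int) < s
        · rw [if_pos h3, if_pos (by omega)]
        · rw [if_neg h3, if_neg (by omega)]
  · rw [if_neg h]
    apply List.map_congr_left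
    intro i hi
    rw [List.mem_range] at hi
    rw [if_pos (by omega), if_pos (by omega)]

/-- Invariant of B's loop: starting from the `s`-th tuple, a run of `k` steps
    flips its way through tuples `s+1 … s+k`. -/
theorem pv_loop (n : Int) :
    ∀ (k : Nat) (s : Int), 0 ≤ s → ∀ (acc : List (List Int)),
      (PySem.List.pyRange (s + 1) (s + 1 + (k : Int)) 1).foldl
        (fun (st : List Int × List (List Int)) j =>
          let curr := if j - 1 < n then st.1.set (j-1).toNat (-1) else st.1
          (curr, st.2 ++ [curr]))
        (pvTup n s, acc)
      = (pvTup n (s + (k : Int)),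
         acc ++ (List.range k).map (fun (i : Nat) => pvTup n (s + 1 + (i : Int)))) := by
  intro k
  induction k with
  | zero =>
    intro s _ acc
    rw [PySem.List.pyRange_one_eq_nil (by omega)]
    simp
  | succ k ih =>
    intro s hs acc
    rw [PySem.List.pyRange_one_cons (by push_cast; omega)]
    rw [List.foldl_cons]
    have hstep : (if s + 1 - 1 < n then (pvTup n s).set (s + 1 - 1).toNat (-1) else pvTup n s)
        = pvTup n (s + 1) := by
      rw [show s + 1 - 1 = s from by ring]
      exact pv_flip n s hs
    simp only [hstep]
    rw [show s + 1 + ((k : Nat) + 1 : Nat) = (s + 1) + 1 + (k : Int) from by push_cast; ring]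
    rw [ih (s + 1) (by omega) (acc ++ [pvTup n (s + 1)])]
    congr 1
    · congr 1; push_cast; ring
    · rw [List.range_succ_eq_map, List.map_cons, List.map_map, List.append_assoc,
          List.singleton_append]
      congr 1
      simp only [List.cons.injEq]
      refine ⟨by congr 1; norm_num, ?_⟩
      apply List.map_congr_left
      intro i _
      simp only [Function.comp]
      congr 1
      push_cast; ring

theorem pv_A_eq (n d : Int) :
    get_staircase_fourier_coeff_tuples n d
      = (List.range (d+1).toNat).map (fun (k : Nat) => pvTup n (k : Int)) := by
  unfold get_staircase_fourier_coeff_tuples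
  have key : ∀ (js : List Int) (acc : List (List Int)),
      js.foldl (fun acc j =>
        acc ++ [(PySem.List.pyRange 0 n 1).foldl (fun c i => c ++ [if i < j then -1 else 1]) []]) acc
        = acc ++ js.map (pvTup n) := by
    intro js
    induction js with
    | nil => simp
    | cons j js ih => intro acc; rw [List.foldl_cons, pv_inner, ih]; simp
  rw [key, PySem.List.pyRange_one, List.nil_append, List.map_map,
      show d + 1 - (0:Int) = d + 1 from by ring]
  apply List.map_congr_left
  intro i _
  simp [Function.comp]

-- ===== VERDICT (by name: the statement is the Claim_ definition above) =====
theorem get_staircase_fourier_coeff_tuples_spec : Claim_equal_get_staircase_fourier_coeff_tuples := by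
  intro n d _
  unfold Spec_get_staircase_fourier_coeff_tuples get_staircase_fourier_coeff_tuples_alt
  rw [pv_A_eq]
  by_cases hd : d < 0
  · rw [if_pos hd, show (d+1).toNat = 0 from by omega]
    simp
  · rw [if_neg hd]
    have h0 : List.replicate n.toNat (1:Int) = pvTup n 0 := (pv_tup_zero n).symm
    have hloop := pv_loop n d.toNat 0 (by norm_num) [pvTup n 0]
    rw [show (0:Int) + 1 = 1 from by ring] at hloop
    rw [show (1:Int) + (d.toNat : Int) = d + 1 from by omega] at hloop
    rw [show (0:Int) + (d.toNat : Int) = d from by omega] at hloop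
    simp only [h0]
    rw [hloop]
    rw [show (d+1).toNat = d.toNat + 1 from by omega, List.range_succ_eq_map, List.map_cons,
        List.map_map, List.singleton_append]
    simp only [List.cons.injEq]
    refine ⟨by congr 1, ?_⟩
    apply List.map_congr_left
    intro i _
    simp only [Function.comp]
    congr 1
    push_cast; ring
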